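-- pv_equiv track=rewrite | github.com/Plevell/5-in-a-row | 5-in-a-row.py | evaluate_tuple
-- ===== SOURCE A (Python) =====
-- TARGET_LEN = 5
--
-- def evaluate_tuple(line):
--     """
--     returns cube of number of Xs (or Os) in the tuple if there are only Xs
--     (or Os); otherwise returns 0
--     """
--     score = 0
--     tuple_x = 0
--     tuple_o = 0
--     for i in range(TARGET_LEN):
--         if line[i] == True: tuple_o += 1
--         if line[i] == False: tuple_x += 1
--     if tuple_x==0: score += tuple_o**3
--     elif tuple_o==0: score -= tuple_x**3
--     for i in range(TARGET_LEN, len(line)):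
--         if line[i] == True: tuple_o += 1
--         elif line[i] == False: tuple_x += 1
--         if line[i-TARGET_LEN] == True: tuple_o -= 1
--         if line[i-TARGET_LEN] == False: tuple_x -= 1
--         if tuple_x==0: score += tuple_o**3
--         elif tuple_o==0: score -= tuple_x**3
--     return score
-- ===== SOURCE B (Python) =====
-- TARGET_LEN = 5
--
-- def evaluate_tuple(line):
--     """
--     returns cube of number of Xs (or Os) in the tuple if there are only Xs
--     (or Os); otherwise returns 0
--     """
--     score = 0
--     for start in range(len(line) - TARGET_LEN + 1):
--         window = line[start:start + TARGET_LEN]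
--         o = sum(1 for v in window if v == True)
--         x = sum(1 for v in window if v == False)
--         if x == 0:
--             score += o ** 3
--         elif o == 0:
--             score -= x ** 3
--     return score
-- ===== Notes on version B (the rewrite author's own statement) =====
-- stated objective: alternative
-- what changed: B replaces A's incremental sliding-window bookkeeping (add the entering cell, subtract the leaving cell, plus a separate priming loop) with a single loop over window starts that recounts each 5-cell slice from scratch.
import Mathlib
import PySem

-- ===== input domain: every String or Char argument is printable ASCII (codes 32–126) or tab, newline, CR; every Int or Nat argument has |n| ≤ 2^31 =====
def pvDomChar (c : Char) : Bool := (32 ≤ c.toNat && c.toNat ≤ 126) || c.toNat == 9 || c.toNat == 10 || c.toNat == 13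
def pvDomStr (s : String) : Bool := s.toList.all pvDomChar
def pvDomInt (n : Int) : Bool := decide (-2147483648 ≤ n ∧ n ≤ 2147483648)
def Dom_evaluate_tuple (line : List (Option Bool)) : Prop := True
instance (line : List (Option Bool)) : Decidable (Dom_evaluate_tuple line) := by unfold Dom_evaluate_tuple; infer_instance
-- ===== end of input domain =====

-- B rescans each length-5 window from scratch instead of A's incremental add/subtract
-- sliding update: an alternative decomposition of the same O(n) task.

-- ===== PORT A =====
-- body of A's first for-loop (state = (tuple_o, tuple_x))
def pvStepInit (line : List (Option Bool)) (st : Int × Int) (i : Int) : Int × Int :=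
  let v := PySem.List.pyGetD line i none
  (if v == some true then st.1 + 1 else st.1,
   if v == some false then st.2 + 1 else st.2)

-- body of A's second for-loop (state = (score, tuple_o, tuple_x))
def pvStepA (line : List (Option Bool)) (st : Int × Int × Int) (i : Int) : Int × Int × Int :=
  let v := PySem.List.pyGetD line i none
  let u := PySem.List.pyGetD line (i - 5) none
  let o1 := if v == some true then st.2.1 + 1 else st.2.1
  let x1 := if v == some true then st.2.2
            else if v == some false then st.2.2 + 1 else st.2.2
  let o2 := if u == some true then o1 - 1 else o1
  let x2 := if u == some false then x1 - 1 else x1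
  let sc := if x2 = 0 then st.1 + o2 ^ 3
            else if o2 = 0 then st.1 - x2 ^ 3 else st.1
  (sc, o2, x2)

def evaluate_tuple (line : List (Option Bool)) : Int :=
  let init := (PySem.List.pyRange 0 5 1).foldl (pvStepInit line) (0, 0)
  let score0 : Int :=
    if init.2 = 0 then init.1 ^ 3
    else if init.1 = 0 then -(init.2 ^ 3) else 0
  let fin := (PySem.List.pyRange 5 (line.length : Int) 1).foldl (pvStepA line)
      (score0, init.1, init.2)
  fin.1

-- ===== PORT B =====
-- body of B's for-loop over window starts
def pvStepB (line : List (Option Bool)) (score : Int) (start : Int) : Int :=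
  let window := PySem.List.slice line (some start) (some (start + 5))
  let o : Int := window.countP (fun v => v == some true)
  let x : Int := window.countP (fun v => v == some false)
  if x = 0 then score + o ^ 3
  else if o = 0 then score - x ^ 3 else score

def evaluate_tuple_alt (line : List (Option Bool)) : Int :=
  (PySem.List.pyRange 0 ((line.length : Int) - 5 + 1) 1).foldl (pvStepB line) 0

-- ===== PRECONDITION & SPEC =====
-- Pre_ excludes lines shorter than 5, on which A's indexing line[i] raises IndexError.
def Pre_evaluate_tuple (line : List (Option Bool)) : Prop := 5 ≤ line.length
instance (line : List (Option Bool)) : Decidable (Pre_evaluate_tuple line) := by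
  unfold Pre_evaluate_tuple; infer_instance

def pvWitness_evaluate_tuple : List (Option Bool) :=
  [some true, some false, none, some true, some false, some false]

def Spec_evaluate_tuple (line : List (Option Bool)) (out : Int) : Prop := out = evaluate_tuple_alt line
instance (line : List (Option Bool)) (out : Int) : Decidable (Spec_evaluate_tuple line out) := by
  unfold Spec_evaluate_tuple; infer_instance

-- ===== CLAIM (what is proved, stated in full; the proofs are below) =====
def Claim_equal_evaluate_tuple : Prop := ∀ (line : List (Option Bool)), Dom_evaluate_tuple line → Pre_evaluate_tuple line → Spec_evaluate_tuple line (evaluate_tuple line)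

-- ===== LEMMAS AND PROOFS =====

-- the window of 5 cells starting at s, its counts, and its score contribution
def pvWin (l : List (Option Bool)) (s : Nat) : List (Option Bool) := (l.drop s).take 5
def pvCntO (w : List (Option Bool)) : Int := w.countP (fun v => v == some true)
def pvCntX (w : List (Option Bool)) : Int := w.countP (fun v => v == some false)
def pvContrib (w : List (Option Bool)) : Int :=
  if pvCntX w = 0 then pvCntO w ^ 3 else if pvCntO w = 0 then -(pvCntX w ^ 3) else 0
-- reference value: sum of the contributions of the first m windows
def pvSum (l : List (Option Bool)) (m : Nat) : Int :=
  (List.range m).foldl (fun sc s => sc + pvContrib (pvWin l s)) 0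

theorem pvSum_succ (l : List (Option Bool)) (m : Nat) :
    pvSum l (m + 1) = pvSum l m + pvContrib (pvWin l m) := by
  simp [pvSum, List.range_succ]

theorem pvWin_head (l : List (Option Bool)) (s : Nat) (h : s < l.length) :
    pvWin l s = l.getD s none :: (l.drop (s + 1)).take 4 := by
  rw [pvWin, List.drop_eq_getElem_cons h, List.getD_eq_getElem?_getD,
    List.getElem?_eq_getElem h]
  rfl

theorem pvWin_last (l : List (Option Bool)) (s : Nat) (h : s + 4 < l.length) :
    pvWin l s = (l.drop s).take 4 ++ [l.getD (s + 4) none] := by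
  rw [pvWin, show (5 : Nat) = 4 + 1 from rfl, List.take_succ]
  simp [List.getElem?_drop, List.getElem?_eq_getElem h, List.getD_eq_getElem?_getD]

theorem pvCntO_cons (v : Option Bool) (w : List (Option Bool)) :
    pvCntO (v :: w) = (if v == some true then 1 else 0) + pvCntO w := by
  rcases v with _ | (_ | _) <;> simp [pvCntO, List.countP_cons] <;> omega

theorem pvCntX_cons (v : Option Bool) (w : List (Option Bool)) :
    pvCntX (v :: w) = (if v == some false then 1 else 0) + pvCntX w := by
  rcases v with _ | (_ | _) <;> simp [pvCntX, List.countP_cons] <;> omega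

theorem pvCntO_append_singleton (w : List (Option Bool)) (v : Option Bool) :
    pvCntO (w ++ [v]) = pvCntO w + (if v == some true then 1 else 0) := by
  rcases v with _ | (_ | _) <;>
    simp [pvCntO, List.countP_append, List.countP_cons] <;> omega

theorem pvCntX_append_singleton (w : List (Option Bool)) (v : Option Bool) :
    pvCntX (w ++ [v]) = pvCntX w + (if v == some false then 1 else 0) := by
  rcases v with _ | (_ | _) <;>
    simp [pvCntX, List.countP_append, List.countP_cons] <;> omega

-- one step of A's sliding loop, read against the window counts
set_option maxHeartbeats 1000000 in
theorem pvStepA_window (l : List (Option Bool)) (sc : Int) (k : Nat)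
    (h : 5 + k < l.length) :
    pvStepA l (sc, pvCntO (pvWin l k), pvCntX (pvWin l k)) ((5 : Int) + (k : Int)) =
      (sc + pvContrib (pvWin l (k + 1)),
       pvCntO (pvWin l (k + 1)), pvCntX (pvWin l (k + 1))) := by
  have hk : k < l.length := by omega
  have hv : PySem.List.pyGetD l ((5 : Int) + (k : Int)) none = l.getD (k + 5) none := by
    rw [show ((5 : Int) + (k : Int)) = ((k + 5 : Nat) : Int) by push_cast; ring,
      PySem.List.pyGetD_natCast]
  have hu : PySem.List.pyGetD l ((5 : Int) + (k : Int) - 5) none = l.getD k none := by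
    rw [show ((5 : Int) + (k : Int) - 5) = ((k : Nat) : Int) by push_cast; ring,
      PySem.List.pyGetD_natCast]
  have hold : pvWin l k = l.getD k none :: (l.drop (k + 1)).take 4 := pvWin_head l k hk
  have hnew : pvWin l (k + 1) = (l.drop (k + 1)).take 4 ++ [l.getD (k + 5) none] := by
    have h2 := pvWin_last l (k + 1) (by omega)
    rw [show k + 1 + 4 = k + 5 from by omega] at h2
    exact h2
  have hp : (0 : Int) ≤ pvCntO ((l.drop (k + 1)).take 4) := by simp [pvCntO]
  have hq : (0 : Int) ≤ pvCntX ((l.drop (k + 1)).take 4) := by simp [pvCntX]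
  simp only [pvStepA, hv, hu, hold, hnew, pvCntO_cons, pvCntX_cons,
    pvCntO_append_singleton, pvCntX_append_singleton, pvContrib]
  clear hv hu hold hnew h hk
  rcases l.getD k none with _ | (_ | _) <;> rcases l.getD (k + 5) none with _ | (_ | _) <;>
    (norm_num [Prod.mk.injEq]
     (try refine ⟨?_, ?_, ?_⟩) <;> (try refine ⟨?_, ?_⟩) <;> (try split_ifs) <;>
       first
         | rfl
         | ring1
         | omega
         | (exfalso; omega)
         | trivial)

-- A's sliding loop computes the running sum of window contributions
theorem pvLoopA (l : List (Option Bool)) (k : Nat) (h : 5 + k ≤ l.length) :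
    (PySem.List.pyRange 5 ((5 : Int) + (k : Int)) 1).foldl (pvStepA l)
        (pvSum l 1, pvCntO (pvWin l 0), pvCntX (pvWin l 0)) =
      (pvSum l (k + 1), pvCntO (pvWin l k), pvCntX (pvWin l k)) := by
  induction k with
  | zero =>
      rw [show ((5 : Int) + ((0 : Nat) : Int)) = 5 by norm_num,
        PySem.List.pyRange_one_eq_nil le_rfl]
      rfl
  | succ k ih =>
      have hk : 5 + k ≤ l.length := by omega
      rw [show ((5 : Int) + ((k + 1 : Nat) : Int)) = ((5 : Int) + (k : Int)) + 1 by
          push_cast; ring,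
        PySem.List.pyRange_one_succ_right (by omega), List.foldl_append, ih hk]
      simp only [List.foldl_cons, List.foldl_nil]
      rw [pvStepA_window l (pvSum l (k + 1)) k (by omega)]
      conv_rhs => rw [pvSum_succ]

-- A's initial explicit loop counts the first window
theorem pvInit (a b c d e : Option Bool) (t : List (Option Bool)) :
    (PySem.List.pyRange 0 5 1).foldl (pvStepInit (a :: b :: c :: d :: e :: t)) (0, 0) =
      (pvCntO (pvWin (a :: b :: c :: d :: e :: t) 0),
       pvCntX (pvWin (a :: b :: c :: d :: e :: t) 0)) := by
  rw [show PySem.List.pyRange 0 5 1 = [0, 1, 2, 3, 4] from by decide]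
  simp only [List.foldl_cons, List.foldl_nil, pvStepInit]
  rw [show PySem.List.pyGetD (a :: b :: c :: d :: e :: t) 0 none = a from by simp [pysem],
    show PySem.List.pyGetD (a :: b :: c :: d :: e :: t) 1 none = b from by simp [pysem],
    show PySem.List.pyGetD (a :: b :: c :: d :: e :: t) 2 none = c from by simp [pysem],
    show PySem.List.pyGetD (a :: b :: c :: d :: e :: t) 3 none = d from by simp [pysem],
    show PySem.List.pyGetD (a :: b :: c :: d :: e :: t) 4 none = e from by simp [pysem],
    show pvWin (a :: b :: c :: d :: e :: t) 0 = [a, b, c, d, e] from rfl]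
  rcases a with _ | (_ | _) <;> rcases b with _ | (_ | _) <;> rcases c with _ | (_ | _) <;>
    rcases d with _ | (_ | _) <;> rcases e with _ | (_ | _) <;> rfl

-- A equals the window-contribution sum
theorem pvA_eq_sum (l : List (Option Bool)) (h : 5 ≤ l.length) :
    evaluate_tuple l = pvSum l (l.length - 4) := by
  match l, h with
  | a :: b :: c :: d :: e :: t, h =>
    simp only [evaluate_tuple, pvInit a b c d e t]
    rw [show (if pvCntX (pvWin (a :: b :: c :: d :: e :: t) 0) = 0 then
          pvCntO (pvWin (a :: b :: c :: d :: e :: t) 0) ^ 3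
        else if pvCntO (pvWin (a :: b :: c :: d :: e :: t) 0) = 0 then
          -(pvCntX (pvWin (a :: b :: c :: d :: e :: t) 0) ^ 3)
        else 0) = pvSum (a :: b :: c :: d :: e :: t) 1 from by
        simp [pvSum, pvContrib, List.range_one]]
    rw [show (((a :: b :: c :: d :: e :: t).length : Nat) : Int) =
        (5 : Int) + (((a :: b :: c :: d :: e :: t).length - 5 : Nat) : Int) from by
        simp [List.length_cons]; omega]
    rw [pvLoopA (a :: b :: c :: d :: e :: t) ((a :: b :: c :: d :: e :: t).length - 5)
        (by omega)]
    rw [show (a :: b :: c :: d :: e :: t).length - 5 + 1 =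
        (a :: b :: c :: d :: e :: t).length - 4 from by simp [List.length_cons]]

-- B equals the window-contribution sum
theorem pvB_eq_sum (l : List (Option Bool)) (h : 5 ≤ l.length) :
    evaluate_tuple_alt l = pvSum l (l.length - 4) := by
  simp only [evaluate_tuple_alt]
  rw [show ((l.length : Int) - 5 + 1) = ((l.length - 4 : Nat) : Int) from by omega]
  have main : ∀ m : Nat,
      (PySem.List.pyRange 0 (m : Int) 1).foldl (pvStepB l) 0 = pvSum l m := by
    intro m
    induction m with
    | zero =>
        rw [show (((0 : Nat) : Int)) = (0 : Int) by norm_num,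
          PySem.List.pyRange_one_eq_nil le_rfl]
        rfl
    | succ m ih =>
        rw [show (((m + 1 : Nat) : Int)) = ((m : Int) + 1) by push_cast; ring,
          PySem.List.pyRange_one_succ_right (by omega), List.foldl_append, ih]
        simp only [List.foldl_cons, List.foldl_nil, pvStepB]
        rw [show ((m : Int) + 5) = ((m : Int) + ((5 : Nat) : Int)) from by norm_num,
          PySem.List.slice_natCast_add]
        rw [pvSum_succ]
        simp only [pvContrib, pvCntO, pvCntX, pvWin]
        split_ifs <;> ring
  exact main (l.length - 4)

-- ===== VERDICT (by name: the statement is the Claim_ definition above) =====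
theorem evaluate_tuple_spec : Claim_equal_evaluate_tuple := by
  intro line _ hpre
  unfold Spec_evaluate_tuple
  rw [pvA_eq_sum line hpre, pvB_eq_sum line hpre]
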